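-- pv_equiv track=rewrite | github.com/AuNooAI/AunooAI | app/routes/trend_convergence_routes.py | _complete_json_manually
-- ===== SOURCE A (Python) =====
-- def _complete_json_manually(text: str) -> str:
--     """Manually complete truncated JSON by adding missing closing braces and brackets"""
--     import re
--
--     # Find the start of the JSON object
--     start_brace = text.find('{')
--     if start_brace == -1:
--         return text
--
--     # Count all braces and brackets
--     brace_count = 0
--     bracket_count = 0
--     in_string = False
--     escape_next = False
--
--     for i, char in enumerate(text[start_brace:], start_brace):
--         if escape_next:
--             escape_next = False
--             continue
--
--         if char == '\\':
--             escape_next = True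
--             continue
--
--         if char == '"' and not escape_next:
--             in_string = not in_string
--             continue
--
--         if not in_string:
--             if char == '{':
--                 brace_count += 1
--             elif char == '}':
--                 brace_count -= 1
--             elif char == '[':
--                 bracket_count += 1
--             elif char == ']':
--                 bracket_count -= 1
--
--     # Add missing closing braces and brackets
--     result = text[start_brace:]
--     result += ']' * bracket_count
--     result += '}' * brace_count
--
--     return result
-- ===== SOURCE B (Python) =====
-- def _complete_json_manually(text: str) -> str:
--     """Manually complete truncated JSON by adding missing closing braces and brackets"""
--     start = text.find('{')
--     if start == -1:
--         return text
--     rest = text[start:]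
--     # One pass: keep only the characters A's counting loop would look at
--     # (drop escaped chars and their backslash, quote delimiters, and string contents).
--     cleaned = []
--     in_string = False
--     escape_next = False
--     for ch in rest:
--         if escape_next:
--             escape_next = False
--         elif ch == '\\':
--             escape_next = True
--         elif ch == '"':
--             in_string = not in_string
--         elif not in_string:
--             cleaned.append(ch)
--     cleaned = ''.join(cleaned)
--     bracket_count = cleaned.count('[') - cleaned.count(']')
--     brace_count = cleaned.count('{') - cleaned.count('}')
--     return rest + ']' * bracket_count + '}' * brace_count
-- ===== Notes on version B (the rewrite author's own statement) =====
-- stated objective: alternative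
-- what changed: A counts all four brackets with running counters inside one loop over four branches; B first builds a filtered string containing only the structurally significant characters (dropping escapes, quotes and string contents) and then obtains the two deficits as differences of str.count calls.
import Mathlib
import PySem

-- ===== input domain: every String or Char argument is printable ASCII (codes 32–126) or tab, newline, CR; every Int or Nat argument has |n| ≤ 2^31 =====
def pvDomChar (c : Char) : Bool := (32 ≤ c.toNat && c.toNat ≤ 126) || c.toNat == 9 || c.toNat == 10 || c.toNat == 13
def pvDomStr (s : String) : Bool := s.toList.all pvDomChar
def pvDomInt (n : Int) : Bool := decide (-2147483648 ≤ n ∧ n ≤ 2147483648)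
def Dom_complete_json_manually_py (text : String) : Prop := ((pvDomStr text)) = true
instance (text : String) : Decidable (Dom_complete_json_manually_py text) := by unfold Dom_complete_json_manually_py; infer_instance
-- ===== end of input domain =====

-- B replaces A's four in-loop counters by a filter pass producing a filtered string whose
-- character counts give the two deficits (alternative decomposition, same cost).

-- ===== PORT A =====
-- A's counting loop: state (brace_count, bracket_count, in_string, escape_next)
def pvALoop : List Char → Int → Int → Bool → Bool → Int × Int
  | [], b, k, _, _ => (b, k)
  | c :: rest, b, k, inS, esc =>
    if esc then pvALoop rest b k inS false
    else if c = '\\' then pvALoop rest b k inS true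
    else if c = '"' then pvALoop rest b k (!inS) esc
    else if !inS then
      if c = '{' then pvALoop rest (b + 1) k inS esc
      else if c = '}' then pvALoop rest (b - 1) k inS esc
      else if c = '[' then pvALoop rest b (k + 1) inS esc
      else if c = ']' then pvALoop rest b (k - 1) inS esc
      else pvALoop rest b k inS esc
    else pvALoop rest b k inS esc

def complete_json_manually_py (text : String) : String :=
  let start := PySem.Str.find text "{"
  if start = -1 then text
  else
    let rest := (PySem.Str.slice text (some start) none).toList
    let bk := pvALoop rest 0 0 false false
    -- ']' * n is empty for n ≤ 0 (replicate n.toNat)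
    String.ofList (rest ++ List.replicate bk.2.toNat ']' ++ List.replicate bk.1.toNat '}')

-- ===== PORT B =====
-- B's filter pass: keep only the characters A's loop would count over
def pvBClean : List Char → Bool → Bool → List Char
  | [], _, _ => []
  | c :: rest, inS, esc =>
    if esc then pvBClean rest inS false
    else if c = '\\' then pvBClean rest inS true
    else if c = '"' then pvBClean rest (!inS) esc
    else if inS then pvBClean rest inS esc
    else c :: pvBClean rest inS esc

def complete_json_manually_py_alt (text : String) : String :=
  let start := PySem.Str.find text "{"
  if start = -1 then text
  else
    let rest := (PySem.Str.slice text (some start) none).toList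
    let cl := pvBClean rest false false
    let bracket : Int := (cl.count '[' : Int) - (cl.count ']' : Int)
    let brace : Int := (cl.count '{' : Int) - (cl.count '}' : Int)
    String.ofList (rest ++ List.replicate bracket.toNat ']' ++ List.replicate brace.toNat '}')

-- ===== PRECONDITION & SPEC =====
def Spec_complete_json_manually_py (text : String) (out : String) : Prop := out = complete_json_manually_py_alt text
instance (text : String) (out : String) : Decidable (Spec_complete_json_manually_py text out) := by unfold Spec_complete_json_manually_py; infer_instance

-- ===== CLAIM (what is proved, stated in full; the proofs are below) =====
def Claim_equal_complete_json_manually_py : Prop := ∀ (text : String), Dom_complete_json_manually_py text → Spec_complete_json_manually_py text (complete_json_manually_py text)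

-- ===== LEMMAS AND PROOFS =====
lemma pvALoop_eq_counts (l : List Char) (b k : Int) (inS esc : Bool) :
    pvALoop l b k inS esc =
      (b + ((pvBClean l inS esc).count '{' : Int) - ((pvBClean l inS esc).count '}' : Int),
       k + ((pvBClean l inS esc).count '[' : Int) - ((pvBClean l inS esc).count ']' : Int)) := by
  induction l generalizing b k inS esc with
  | nil => simp [pvALoop, pvBClean]
  | cons c rest ih =>
    simp only [pvALoop, pvBClean]
    split_ifs with h1 h2 h3 h4 h5 h6 h7 h8 <;>
      rw [ih] <;> simp_all [Prod.ext_iff] <;> omega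

-- ===== VERDICT (by name: the statement is the Claim_ definition above) =====
theorem complete_json_manually_py_spec : Claim_equal_complete_json_manually_py := by
  intro text _
  unfold Spec_complete_json_manually_py complete_json_manually_py complete_json_manually_py_alt
  simp only
  split_ifs with h
  · rfl
  · rw [pvALoop_eq_counts]
    simp
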